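-- pv_equiv track=rewrite | github.com/DSSSComputerClub/CCC-23-24 | Junior/Graphs/2018 J5.py | bfs
-- ===== SOURCE A (Python) =====
-- from collections import deque, defaultdict
--
-- def bfs(graph, src):
--     queue = deque()
--     visited = set()
--     queue.append((src, 1))
--     visited.add(src)
--     while queue:
--         curr = queue.popleft()
--         if len(graph[curr[0]]) == 0:
--             return curr[1]
--         for neighbour in graph[curr[0]]:
--             if not neighbour in visited:
--                 visited.add(neighbour)
--                 queue.append((neighbour, curr[1]+1))
-- ===== SOURCE B (Python) =====
-- def bfs(graph, src):
--     # Bellman-Ford-style: repeatedly relax the out-edges of every known node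
--     # (len(graph) + 1 rounds suffice for shortest levels in an unweighted
--     # graph), then return the smallest level among entries whose adjacency
--     # list is empty (the nearest sink), or None if no sink was reached.
--     dist = {src: 1}
--     for _ in range(len(graph) + 1):
--         for u in list(dist):
--             du = dist[u]
--             for v in graph[u]:
--                 if v not in dist or du + 1 < dist[v]:
--                     dist[v] = du + 1
--     best = None
--     for u, d in dist.items():
--         if len(graph[u]) == 0 and (best is None or d < best):
--             best = d
--     return best
-- ===== Notes on version B (the rewrite author's own statement) =====
-- stated objective: alternative
-- what changed: Replaces the early-exit BFS queue with a Bellman-Ford-style algorithm: a distance dict relaxed over every known node's out-edges for len(graph)+1 rounds, followed by a minimum scan over the entries whose adjacency list is empty.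
-- outside the precondition, e.g. on bfs({2: [1, 3], 1: [-1, -23], -1: []}, 1): A returns 2, B raises KeyError; on bfs({0: [1]}, 0): A raises KeyError, B raises KeyError
import Mathlib
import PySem

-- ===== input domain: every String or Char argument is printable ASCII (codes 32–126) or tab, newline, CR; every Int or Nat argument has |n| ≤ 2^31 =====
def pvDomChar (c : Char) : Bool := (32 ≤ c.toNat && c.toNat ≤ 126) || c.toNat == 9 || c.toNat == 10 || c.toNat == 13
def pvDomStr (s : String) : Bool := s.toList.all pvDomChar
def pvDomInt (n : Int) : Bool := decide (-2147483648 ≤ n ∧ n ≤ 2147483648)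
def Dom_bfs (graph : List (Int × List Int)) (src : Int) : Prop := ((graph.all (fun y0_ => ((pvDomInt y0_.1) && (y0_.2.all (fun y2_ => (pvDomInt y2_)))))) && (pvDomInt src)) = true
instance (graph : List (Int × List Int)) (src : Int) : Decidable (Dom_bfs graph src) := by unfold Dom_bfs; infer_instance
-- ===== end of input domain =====

-- B replaces A's early-exit BFS queue by a different algorithm: Bellman-Ford-style relaxation of a
-- distance dict for len(graph)+1 rounds followed by a minimum scan over sink entries; objective:
-- alternative. Return-value equivalence only: Python A's defaultdict argument gains empty-list
-- entries for the keys it indexes (B indexes a different set of keys).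

-- ===== PORT A =====
-- first-match association-list lookup with default [] = Python defaultdict(list) indexing (read part)
def pvAdj : List (Int × List Int) → Int → List Int
  | [], _ => []
  | p :: rest, n => if p.1 == n then p.2 else pvAdj rest n

-- the elements of graph[n] that are not yet in vis, in first-occurrence order (used only to state
-- the termination lemmas for A's loop and in the proofs below)
def pvNew (vis : PySem.Set Int) : List Int → List Int
  | [] => []
  | a :: t => if a ∈ vis then pvNew vis t else a :: pvNew (PySem.Set.add vis a) t

-- termination measure for A's while loop: unvisited neighbour values + queue length
def pvMiss (graph : List (Int × List Int)) (vis : PySem.Set Int) : Nat :=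
  ((graph.flatMap Prod.snd).toFinset.filter (fun x => x ∉ vis)).card

lemma pvFoldA_spec (lv : Int) (adj : List Int) : ∀ (q : List (Int × Int)) (vis : PySem.Set Int),
    adj.foldl
      (fun (s : List (Int × Int) × PySem.Set Int) nb =>
        if nb ∈ s.2 then s else (s.1 ++ [(nb, lv)], PySem.Set.add s.2 nb))
      (q, vis)
    = (q ++ (pvNew vis adj).map (fun y => (y, lv)), PySem.Set.update vis adj) := by
  induction adj with
  | nil => intro q vis; simp [pvNew, PySem.Set.update]
  | cons a t ih =>
    intro q vis
    by_cases h : a ∈ vis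
    · simp only [List.foldl_cons, if_pos h, pvNew, PySem.Set.update_cons,
        PySem.Set.add_of_mem h]
      exact ih q vis
    · simp only [List.foldl_cons, if_neg h, pvNew, PySem.Set.update_cons]
      rw [ih]
      simp

lemma pvAdj_subset (graph : List (Int × List Int)) (n : Int) :
    ∀ y ∈ pvAdj graph n, y ∈ graph.flatMap Prod.snd := by
  induction graph with
  | nil => intro y hy; simp [pvAdj] at hy
  | cons p rest ih =>
    intro y hy
    simp only [pvAdj] at hy
    by_cases h : p.1 == n
    · rw [if_pos h] at hy
      exact List.mem_flatMap.mpr ⟨p, List.mem_cons_self, hy⟩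
    · rw [if_neg h] at hy
      have := ih y hy
      simp only [List.flatMap_cons, List.mem_append]
      exact Or.inr this

lemma pvMiss_update (graph : List (Int × List Int)) (adj : List Int)
    (hsub : ∀ y ∈ adj, y ∈ graph.flatMap Prod.snd) :
    ∀ vis, pvMiss graph (PySem.Set.update vis adj) + (pvNew vis adj).length ≤ pvMiss graph vis := by
  induction adj with
  | nil => intro vis; simp only [pvNew, PySem.Set.update, List.foldl_nil, List.length_nil, Nat.add_zero]; exact le_rfl
  | cons a t ih =>
    intro vis
    have hsub' : ∀ y ∈ t, y ∈ graph.flatMap Prod.snd := fun y hy => hsub y (List.mem_cons_of_mem a hy)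
    by_cases h : a ∈ vis
    · simp only [PySem.Set.update_cons, PySem.Set.add_of_mem h, pvNew, if_pos h]
      exact ih hsub' vis
    · simp only [PySem.Set.update_cons, pvNew, if_neg h, List.length_cons]
      have h1 : pvMiss graph (PySem.Set.add vis a) + 1 ≤ pvMiss graph vis := by
        unfold pvMiss
        have hmem : a ∈ (graph.flatMap Prod.snd).toFinset.filter (fun x => x ∉ vis) := by
          simp [List.mem_toFinset.mpr (hsub a List.mem_cons_self), h]
        have heq : (graph.flatMap Prod.snd).toFinset.filter (fun x => x ∉ PySem.Set.add vis a)
            = ((graph.flatMap Prod.snd).toFinset.filter (fun x => x ∉ vis)).erase a := by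
          ext x
          simp only [Finset.mem_filter, Finset.mem_erase, PySem.Set.mem_add]
          tauto
        rw [heq, Finset.card_erase_of_mem hmem]
        have := Finset.card_pos.mpr ⟨a, hmem⟩
        omega
      have h2 := ih hsub' (PySem.Set.add vis a)
      omega

def bfsLoopA (graph : List (Int × List Int)) : List (Int × Int) → PySem.Set Int → Option Int
  | [], _ => none
  | (n, l) :: rest, visited =>
    if (pvAdj graph n).length = 0 then some l
    else
      let st := (pvAdj graph n).foldl
        (fun (s : List (Int × Int) × PySem.Set Int) nb =>
          if nb ∈ s.2 then s else (s.1 ++ [(nb, l + 1)], PySem.Set.add s.2 nb))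
        (rest, visited)
      bfsLoopA graph st.1 st.2
  termination_by q vis => pvMiss graph vis + q.length
  decreasing_by
    have hs := pvFoldA_spec (l + 1) (pvAdj graph n) rest visited
    simp only [dite_eq_ite]
    rw [hs]
    have := pvMiss_update graph (pvAdj graph n) (pvAdj_subset graph n) visited
    simp only [List.length_append, List.length_map, List.length_cons]
    omega

def bfs (graph : List (Int × List Int)) (src : Int) : Option Int :=
  bfsLoopA graph [(src, 1)] (PySem.Set.add PySem.Set.empty src)

-- ===== PORT B =====
-- relax all of u's out-edges against the current distance dict (du = dist[u], read once)
def bfsRelax (du : Int) (adj : List Int) (dist : PySem.Dict Int Int) : PySem.Dict Int Int :=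
  adj.foldl
    (fun d v => if d.contains v = false ∨ du + 1 < d.getD v 0 then d.insert v (du + 1) else d)
    dist

-- one relaxation round over the snapshot list(dist) of known nodes
def bfsRound (graph : List (Int × List Int)) (dist : PySem.Dict Int Int) : PySem.Dict Int Int :=
  (PySem.Dict.keys dist).foldl (fun d u => bfsRelax (d.getD u 0) (pvAdj graph u) d) dist

def bfs_alt (graph : List (Int × List Int)) (src : Int) : Option Int :=
  let dist := (List.range (graph.length + 1)).foldl (fun d _ => bfsRound graph d)
    (PySem.Dict.insert PySem.Dict.empty src 1)
  (PySem.Dict.items dist).foldl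
    (fun (best : Option Int) p =>
      if (pvAdj graph p.1).length = 0 then
        match best with
        | none => some p.2
        | some b => if p.2 < b then some p.2 else some b
      else best)
    none

-- ===== PRECONDITION & SPEC =====
-- Pre_bfs (A was written for a defaultdict(list) argument): it asks for a set S of the graph's keys
-- containing src and closed under edges, i.e. no node BFS could dequeue lacks an entry — exactly where
-- a plain-dict call cannot raise KeyError. It conservatively also excludes some graphs on which A
-- still returns because an empty-adjacency node is dequeued before a missing one (see cites).
def Pre_bfs (graph : List (Int × List Int)) (src : Int) : Prop :=
  ∃ S ∈ (graph.map Prod.fst).sublists, src ∈ S ∧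
    ∀ n ∈ S, ∀ p ∈ graph, p.1 = n → ∀ m ∈ p.2, m ∈ S
instance (graph : List (Int × List Int)) (src : Int) : Decidable (Pre_bfs graph src) := by unfold Pre_bfs; infer_instance
def pvWitness_bfs : (List (Int × List Int)) × Int := ([(0, [1, 2]), (1, [0]), (2, [])], 0)
def Spec_bfs (graph : List (Int × List Int)) (src : Int) (out : Option Int) : Prop := out = bfs_alt graph src
instance (graph : List (Int × List Int)) (src : Int) (out : Option Int) : Decidable (Spec_bfs graph src out) := by unfold Spec_bfs; infer_instance

-- ===== CLAIM (what is proved, stated in full; the proofs are below) =====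
def Claim_equal_bfs : Prop := ∀ (graph : List (Int × List Int)) (src : Int), Dom_bfs graph src → Pre_bfs graph src → Spec_bfs graph src (bfs graph src)

-- ===== LEMMAS AND PROOFS =====

-- nodes reachable from src in at most k steps
def RSet (graph : List (Int × List Int)) (src : Int) : Nat → Finset Int
  | 0 => {src}
  | k + 1 => RSet graph src k ∪ (RSet graph src k).biUnion (fun u => (pvAdj graph u).toFinset)

-- v's exact BFS distance from src is k
def MinK (graph : List (Int × List Int)) (src : Int) (v : Int) (k : Nat) : Prop :=
  v ∈ RSet graph src k ∧ ∀ j, v ∈ RSet graph src j → k ≤ j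

-- the common answer specification: none if no reachable sink, else 1 + distance of nearest sink
def IsAns (graph : List (Int × List Int)) (src : Int) (o : Option Int) : Prop :=
  (o = none ∧ ∀ v k, v ∈ RSet graph src k → pvAdj graph v ≠ [])
  ∨ (∃ k v, MinK graph src v k ∧ pvAdj graph v = [] ∧ o = some ((k : Int) + 1)
      ∧ ∀ v' k', MinK graph src v' k' → pvAdj graph v' = [] → k ≤ k')

lemma mem_RSet_succ (graph : List (Int × List Int)) (src v : Int) (k : Nat) :
    v ∈ RSet graph src (k + 1) ↔ v ∈ RSet graph src k ∨ ∃ u ∈ RSet graph src k, v ∈ pvAdj graph u := by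
  simp [RSet, Finset.mem_union, Finset.mem_biUnion, List.mem_toFinset]

lemma RSet_subset_succ (graph : List (Int × List Int)) (src : Int) (k : Nat) :
    RSet graph src k ⊆ RSet graph src (k + 1) := by
  intro x hx; exact (mem_RSet_succ graph src x k).mpr (Or.inl hx)

lemma RSet_mono (graph : List (Int × List Int)) (src : Int) {k m : Nat} (h : k ≤ m) :
    RSet graph src k ⊆ RSet graph src m := by
  induction m with
  | zero => simp [Nat.le_zero.mp h]
  | succ m ih =>
    rcases Nat.lt_or_ge k (m + 1) with h' | h'
    · exact fun x hx => RSet_subset_succ graph src m (ih (Nat.lt_succ_iff.mp h') hx)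
    · have : k = m + 1 := Nat.le_antisymm h h'
      subst this; exact Finset.Subset.refl _

lemma adj_mem_RSet (graph : List (Int × List Int)) (src : Int) {u v : Int} {k : Nat}
    (hu : u ∈ RSet graph src k) (hv : v ∈ pvAdj graph u) : v ∈ RSet graph src (k + 1) :=
  (mem_RSet_succ graph src v k).mpr (Or.inr ⟨u, hu, hv⟩)

lemma exists_minK (graph : List (Int × List Int)) (src v : Int) {k : Nat}
    (h : v ∈ RSet graph src k) : ∃ j, MinK graph src v j ∧ j ≤ k := by
  have hex : ∃ j, v ∈ RSet graph src j := ⟨k, h⟩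
  exact ⟨Nat.find hex, ⟨Nat.find_spec hex, fun j hj => Nat.find_min' hex hj⟩, Nat.find_min' hex h⟩

lemma RSet_all_subset (graph : List (Int × List Int)) (src : Int) {l : Nat}
    (h : RSet graph src (l + 1) ⊆ RSet graph src l) :
    ∀ k, RSet graph src k ⊆ RSet graph src l := by
  intro k
  induction k with
  | zero => exact RSet_mono graph src (Nat.zero_le l)
  | succ k ih =>
    intro x hx
    rcases (mem_RSet_succ graph src x k).mp hx with hx' | ⟨u, hu, hadj⟩
    · exact ih hx'
    · exact h (adj_mem_RSet graph src (ih hu) hadj)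

lemma isAns_unique (graph : List (Int × List Int)) (src : Int) (o o' : Option Int)
    (h : IsAns graph src o) (h' : IsAns graph src o') : o = o' := by
  rcases h with ⟨hn, hall⟩ | ⟨k, v, hmin, hsink, ho, hmin2⟩
  · rcases h' with ⟨hn', _⟩ | ⟨k', v', hmin', hsink', ho', _⟩
    · rw [hn, hn']
    · exact absurd hsink' (hall v' k' hmin'.1)
  · rcases h' with ⟨hn', hall'⟩ | ⟨k', v', hmin', hsink', ho', hmin2'⟩
    · exact absurd hsink (hall' v k hmin.1)
    · have h1 : k ≤ k' := hmin2 v' k' hmin' hsink'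
      have h2 : k' ≤ k := hmin2' v k hmin hsink
      rw [ho, ho', Nat.le_antisymm h1 h2]

-- ===== stabilisation: RSet stops growing after graph.length + 1 steps =====

lemma RSet_growth (graph : List (Int × List Int)) (src : Int) (k : Nat)
    (h : RSet graph src (k + 1) = RSet graph src k) :
    RSet graph src (k + 2) = RSet graph src (k + 1) := by
  have e1 : RSet graph src (k + 2)
      = RSet graph src (k + 1) ∪ (RSet graph src (k + 1)).biUnion (fun u => (pvAdj graph u).toFinset) := rfl
  have e2 : RSet graph src (k + 1)
      = RSet graph src k ∪ (RSet graph src k).biUnion (fun u => (pvAdj graph u).toFinset) := rfl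
  rw [e1, h, ← e2, h]

lemma RSet_fresh (graph : List (Int × List Int)) (src : Int) (k : Nat)
    (h : RSet graph src (k + 2) ≠ RSet graph src (k + 1)) :
    ∃ u, u ∈ RSet graph src (k + 1) ∧ u ∉ RSet graph src k ∧ pvAdj graph u ≠ [] := by
  have hss : RSet graph src (k + 1) ⊂ RSet graph src (k + 2) :=
    (Finset.ssubset_iff_subset_ne).mpr ⟨RSet_subset_succ graph src (k + 1), fun e => h e.symm⟩
  obtain ⟨v, hv2, hv1⟩ := Finset.exists_of_ssubset hss
  rcases (mem_RSet_succ graph src v (k + 1)).mp hv2 with hv' | ⟨u, hu, hadj⟩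
  · exact absurd hv' hv1
  · refine ⟨u, hu, fun huk => hv1 (adj_mem_RSet graph src huk hadj), List.ne_nil_of_mem hadj⟩

lemma key_of_adj_ne (graph : List (Int × List Int)) (u : Int)
    (h : pvAdj graph u ≠ []) : u ∈ graph.map Prod.fst := by
  induction graph with
  | nil => simp [pvAdj] at h
  | cons p rest ih =>
    simp only [pvAdj] at h
    by_cases hpe : p.1 == u
    · rw [← eq_of_beq hpe]
      simp
    · rw [if_neg (by simpa using hpe)] at h
      exact List.mem_cons_of_mem _ (ih h)

lemma growth_card (graph : List (Int × List Int)) (src : Int) :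
    ∀ k, RSet graph src (k + 2) ≠ RSet graph src (k + 1) →
      k + 1 ≤ ((RSet graph src (k + 1)).filter (fun u => pvAdj graph u ≠ [])).card := by
  intro k
  induction k with
  | zero =>
    intro h
    obtain ⟨u, hu1, _, hadj⟩ := RSet_fresh graph src 0 h
    exact Finset.card_pos.mpr ⟨u, Finset.mem_filter.mpr ⟨hu1, by simpa using hadj⟩⟩
  | succ k ih =>
    intro h
    have hprev : RSet graph src (k + 2) ≠ RSet graph src (k + 1) := by
      intro e; exact h (RSet_growth graph src (k + 1) e)
    have hIH := ih hprev
    obtain ⟨u, hu2, hu1, hadj⟩ := RSet_fresh graph src (k + 1) h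
    have hss : (RSet graph src (k + 1)).filter (fun u => pvAdj graph u ≠ [])
        ⊂ (RSet graph src (k + 2)).filter (fun u => pvAdj graph u ≠ []) := by
      refine Finset.ssubset_iff_subset_ne.mpr ⟨Finset.filter_subset_filter _ (RSet_subset_succ graph src (k + 1)), ?_⟩
      intro e
      have : u ∈ (RSet graph src (k + 1)).filter (fun u => pvAdj graph u ≠ []) := by
        rw [e]; exact Finset.mem_filter.mpr ⟨hu2, by simpa using hadj⟩
      exact hu1 (Finset.mem_filter.mp this).1
    exact Nat.succ_le_of_lt (Nat.lt_of_le_of_lt hIH (Finset.card_lt_card hss))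

lemma RSet_stable (graph : List (Int × List Int)) (src : Int) :
    ∀ k, RSet graph src k ⊆ RSet graph src (graph.length + 1) := by
  have hstable : RSet graph src (graph.length + 2) = RSet graph src (graph.length + 1) := by
    by_contra h
    have h1 := growth_card graph src graph.length h
    have h2 : ((RSet graph src (graph.length + 1)).filter (fun u => pvAdj graph u ≠ [])).card
        ≤ graph.length := by
      have hsub : (RSet graph src (graph.length + 1)).filter (fun u => pvAdj graph u ≠ [])
          ⊆ (graph.map Prod.fst).toFinset := by
        intro u hu
        exact List.mem_toFinset.mpr (key_of_adj_ne graph u (by simpa using (Finset.mem_filter.mp hu).2))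
      calc ((RSet graph src (graph.length + 1)).filter (fun u => pvAdj graph u ≠ [])).card
          ≤ (graph.map Prod.fst).toFinset.card := Finset.card_le_card hsub
        _ ≤ (graph.map Prod.fst).length := List.toFinset_card_le _
        _ = graph.length := List.length_map _
    omega
  exact RSet_all_subset graph src (le_of_eq hstable)

-- ===== A-side: the queue loop satisfies IsAns =====

lemma mem_pvNew (y : Int) : ∀ (adj : List Int) (vis : PySem.Set Int),
    y ∈ pvNew vis adj ↔ y ∈ adj ∧ y ∉ vis := by
  intro adj
  induction adj with
  | nil => intro vis; simp [pvNew]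
  | cons a t ih =>
    intro vis
    by_cases h : a ∈ vis
    · rw [pvNew, if_pos h, ih]
      simp only [List.mem_cons]
      constructor
      · rintro ⟨hy, hv⟩; exact ⟨Or.inr hy, hv⟩
      · rintro ⟨rfl | hy, hv⟩
        · exact absurd h hv
        · exact ⟨hy, hv⟩
    · rw [pvNew, if_neg h]
      simp only [List.mem_cons, ih, PySem.Set.mem_add]
      by_cases hya : y = a
      · subst hya; simp [h]
      · simp only [hya, or_false, false_or]
        try tauto

-- loop invariant for A's queue: the queue is the unprocessed tail F of layer l (levels l+1)
-- followed by the discovered part N of layer l+1 (levels l+2)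
def InvA (graph : List (Int × List Int)) (src : Int) (l : Nat) (F N : List Int)
    (vis : PySem.Set Int) : Prop :=
  (∀ x ∈ F, MinK graph src x l) ∧
  (∀ x, x ∈ vis ↔ x ∈ RSet graph src l ∨ x ∈ N) ∧
  (∀ u, MinK graph src u l → u ∈ F ∨ (pvAdj graph u ≠ [] ∧ ∀ v ∈ pvAdj graph u, v ∈ vis)) ∧
  (∀ u j, MinK graph src u j → j < l → pvAdj graph u ≠ []) ∧
  (∀ x ∈ N, MinK graph src x (l + 1))

lemma invA_shift (graph : List (Int × List Int)) (src : Int) (l : Nat) (N : List Int)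
    (vis : PySem.Set Int) (h : InvA graph src l [] N vis) : InvA graph src (l + 1) N [] vis := by
  obtain ⟨h1, h2, h3, h4, h5⟩ := h
  have hvis_sub : ∀ x, x ∈ vis → x ∈ RSet graph src (l + 1) := by
    intro x hx
    rcases (h2 x).mp hx with hR | hN
    · exact RSet_subset_succ _ _ _ hR
    · exact (h5 x hN).1
  have hcov : ∀ u ∈ RSet graph src l, ∀ v ∈ pvAdj graph u, v ∈ vis := by
    intro u hu v hv
    obtain ⟨j, hminj, hjl⟩ := exists_minK graph src u hu
    rcases Nat.lt_or_ge j l with hlt | hge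
    · exact (h2 v).mpr (Or.inl (RSet_mono graph src hlt (adj_mem_RSet graph src hminj.1 hv)))
    · have hjeq : j = l := Nat.le_antisymm hjl hge
      subst hjeq
      rcases h3 u hminj with hF | ⟨_, hsub⟩
      · cases hF
      · exact hsub v hv
  have hvis_sup : ∀ x, x ∈ RSet graph src (l + 1) → x ∈ vis := by
    intro x hx
    rcases (mem_RSet_succ graph src x l).mp hx with hR | ⟨u, hu, hadj⟩
    · exact (h2 x).mpr (Or.inl hR)
    · exact hcov u hu x hadj
  refine ⟨h5, ?_, ?_, ?_, ?_⟩
  · intro x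
    constructor
    · intro hx; exact Or.inl (hvis_sub x hx)
    · rintro (hx | hx)
      · exact hvis_sup x hx
      · cases hx
  · intro u hmin
    left
    have hul : u ∉ RSet graph src l := fun hul => by have := hmin.2 l hul; omega
    rcases (h2 u).mp (hvis_sup u hmin.1) with hR | hN
    · exact absurd hR hul
    · exact hN
  · intro u j hmin hj
    rcases Nat.lt_or_ge j l with hlt | hge
    · exact h4 u j hmin hlt
    · have : j = l := by omega
      subst this
      rcases h3 u hmin with hF | ⟨hne, _⟩
      · cases hF
      · exact hne
  · intro x hx; cases hx

lemma loopA_isAns (graph : List (Int × List Int)) (src : Int) :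
    ∀ (q : List (Int × Int)) (vis : PySem.Set Int),
    (∃ (l : Nat) (F N : List Int),
      q = F.map (fun x => (x, (l : Int) + 1)) ++ N.map (fun x => (x, (l : Int) + 2)) ∧
      InvA graph src l F N vis) →
    IsAns graph src (bfsLoopA graph q vis) := by
  intro q vis
  induction q, vis using bfsLoopA.induct graph with
  | case1 vis =>
    rintro ⟨l, F, N, hshape, hInv⟩
    obtain ⟨hF, hN⟩ : F = [] ∧ N = [] := by
      rcases List.append_eq_nil_iff.mp hshape.symm with ⟨hF, hN⟩
      exact ⟨List.map_eq_nil_iff.mp hF, List.map_eq_nil_iff.mp hN⟩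
    subst hF; subst hN
    obtain ⟨h1, h2, h3, h4, h5⟩ := hInv
    left
    refine ⟨by rw [bfsLoopA], ?_⟩
    have hsub : RSet graph src (l + 1) ⊆ RSet graph src l := by
      intro x hx
      rcases (mem_RSet_succ graph src x l).mp hx with hR | ⟨u, hu, hadj⟩
      · exact hR
      · obtain ⟨j, hminj, hjl⟩ := exists_minK graph src u hu
        rcases Nat.lt_or_ge j l with hlt | hge
        · exact RSet_mono graph src hlt (adj_mem_RSet graph src hminj.1 hadj)
        · have hjeq : j = l := Nat.le_antisymm hjl hge
          subst hjeq
          rcases h3 u hminj with hF | ⟨_, hsubv⟩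
          · cases hF
          · rcases (h2 x).mp (hsubv x hadj) with hR' | hN'
            · exact hR'
            · cases hN'
    intro v k hv
    have hv' := RSet_all_subset graph src hsub k hv
    obtain ⟨j, hminj, hjl⟩ := exists_minK graph src v hv'
    rcases Nat.lt_or_ge j l with hlt | hge
    · exact h4 v j hminj hlt
    · have : j = l := by omega
      subst this
      rcases h3 v hminj with hF | ⟨hne, _⟩
      · cases hF
      · exact hne
  | case2 n lv rest visited hlen =>
    rintro hex
    obtain ⟨l, x, F', N, hshape, hInv⟩ :
        ∃ (l : Nat) (x : Int) (F' N : List Int),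
          (n, lv) :: rest
            = (x :: F').map (fun x => (x, (l : Int) + 1)) ++ N.map (fun x => (x, (l : Int) + 2)) ∧
          InvA graph src l (x :: F') N visited := by
      obtain ⟨l, F, N, hshape, hInv⟩ := hex
      cases F with
      | cons x F' => exact ⟨l, x, F', N, hshape, hInv⟩
      | nil =>
        cases N with
        | nil => simp at hshape
        | cons y N' =>
          refine ⟨l + 1, y, N', [], ?_, invA_shift graph src l (y :: N') visited hInv⟩
          rw [hshape]
          simp only [List.map_nil, List.nil_append, List.append_nil]
          have : ((l : Int) + 1) + 1 = (l : Int) + 2 := by ring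
          push_cast
          rw [this]
    obtain ⟨hn, hlv, hrest⟩ : n = x ∧ lv = (l : Int) + 1 ∧
        rest = F'.map (fun x => (x, (l : Int) + 1)) ++ N.map (fun x => (x, (l : Int) + 2)) := by
      simp only [List.map_cons, List.cons_append, List.cons.injEq, Prod.mk.injEq] at hshape
      exact ⟨hshape.1.1, hshape.1.2, hshape.2⟩
    subst hn; subst hlv; subst hrest
    obtain ⟨h1, h2, h3, h4, h5⟩ := hInv
    rw [bfsLoopA, if_pos hlen]
    right
    refine ⟨l, n, h1 n List.mem_cons_self, List.length_eq_zero_iff.mp hlen, rfl, ?_⟩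
    intro v' k' hmin' hsink'
    by_contra hlt
    exact (h4 v' k' hmin' (by omega)) hsink'
  | case3 n lv rest visited hlen st ih =>
    rintro hex
    obtain ⟨l, x, F', N, hshape, hInv⟩ :
        ∃ (l : Nat) (x : Int) (F' N : List Int),
          (n, lv) :: rest
            = (x :: F').map (fun x => (x, (l : Int) + 1)) ++ N.map (fun x => (x, (l : Int) + 2)) ∧
          InvA graph src l (x :: F') N visited := by
      obtain ⟨l, F, N, hshape, hInv⟩ := hex
      cases F with
      | cons x F' => exact ⟨l, x, F', N, hshape, hInv⟩
      | nil =>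
        cases N with
        | nil => simp at hshape
        | cons y N' =>
          refine ⟨l + 1, y, N', [], ?_, invA_shift graph src l (y :: N') visited hInv⟩
          rw [hshape]
          simp only [List.map_nil, List.nil_append, List.append_nil]
          have : ((l : Int) + 1) + 1 = (l : Int) + 2 := by ring
          push_cast
          rw [this]
    obtain ⟨hn, hlv, hrest⟩ : n = x ∧ lv = (l : Int) + 1 ∧
        rest = F'.map (fun x => (x, (l : Int) + 1)) ++ N.map (fun x => (x, (l : Int) + 2)) := by
      simp only [List.map_cons, List.cons_append, List.cons.injEq, Prod.mk.injEq] at hshape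
      exact ⟨hshape.1.1, hshape.1.2, hshape.2⟩
    subst hn; subst hlv; subst hrest
    rw [bfsLoopA, if_neg hlen]
    obtain ⟨h1, h2, h3, h4, h5⟩ := hInv
    simp only [st] at ih
    simp only [dite_eq_ite] at ih
    rw [pvFoldA_spec] at ih
    rw [pvFoldA_spec]
    apply ih
    refine ⟨l, F', N ++ pvNew visited (pvAdj graph n), ?_, ?_, ?_, ?_, ?_, ?_⟩
    · -- queue shape
      have : ((l : Int) + 1) + 1 = (l : Int) + 2 := by ring
      simp [this, List.map_append, List.append_assoc]
    · exact fun y hy => h1 y (List.mem_cons_of_mem n hy)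
    · -- visited iff
      intro y
      rw [PySem.Set.mem_update]
      constructor
      · rintro (hy | hy)
        · rcases (h2 y).mp hy with hR | hN
          · exact Or.inl hR
          · exact Or.inr (List.mem_append_left _ hN)
        · by_cases hv : y ∈ visited
          · rcases (h2 y).mp hv with hR | hN
            · exact Or.inl hR
            · exact Or.inr (List.mem_append_left _ hN)
          · exact Or.inr (List.mem_append_right _ ((mem_pvNew y _ visited).mpr ⟨hy, hv⟩))
      · rintro (hR | hN)
        · exact Or.inl ((h2 y).mpr (Or.inl hR))
        · rcases List.mem_append.mp hN with hN' | hnew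
          · exact Or.inl ((h2 y).mpr (Or.inr hN'))
          · exact Or.inr ((mem_pvNew y _ visited).mp hnew).1
    · -- processed / frontier split at layer l
      intro u hmin
      rcases h3 u hmin with hF | ⟨hne, hsub⟩
      · rcases List.mem_cons.mp hF with rfl | hF'
        · right
          exact ⟨fun e => hlen (by rw [e]; rfl), fun v hv => (PySem.Set.mem_update _ _ _).mpr (Or.inr hv)⟩
        · exact Or.inl hF'
      · exact Or.inr ⟨hne, fun v hv => (PySem.Set.mem_update _ _ _).mpr (Or.inl (hsub v hv))⟩
    · exact h4
    · -- new nodes are at layer l + 1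
      intro y hy
      rcases List.mem_append.mp hy with hN | hnew
      · exact h5 y hN
      · obtain ⟨hadj, hvis⟩ := (mem_pvNew y _ visited).mp hnew
        have hy1 : y ∈ RSet graph src (l + 1) :=
          adj_mem_RSet graph src (h1 n List.mem_cons_self).1 hadj
        refine ⟨hy1, ?_⟩
        intro j hj
        by_contra hjl
        have : y ∈ RSet graph src l := RSet_mono graph src (by omega) hj
        exact hvis ((h2 y).mpr (Or.inl this))

lemma bfs_isAns (graph : List (Int × List Int)) (src : Int) :
    IsAns graph src (bfs graph src) := by
  apply loopA_isAns graph src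
  refine ⟨0, [src], [], by simp, ?_, ?_, ?_, ?_, ?_⟩
  · intro x hx
    rcases List.mem_cons.mp hx with rfl | h
    · exact ⟨by simp [RSet], fun j _ => Nat.zero_le j⟩
    · cases h
  · intro x
    constructor
    · intro hx
      rcases (PySem.Set.mem_add _ _ _).mp hx with h | rfl
      · cases h
      · exact Or.inl (by simp [RSet])
    · rintro (hx | hx)
      · have : x = src := by simpa [RSet] using hx
        subst this
        exact (PySem.Set.mem_add _ _ _).mpr (Or.inr rfl)
      · cases hx
  · intro u hmin
    have : u = src := by simpa [RSet] using hmin.1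
    subst this
    exact Or.inl List.mem_cons_self
  · intro u j _ hj; omega
  · intro x hx; cases hx

-- ===== B-side: the relaxation rounds satisfy IsAns =====

-- every entry of the distance dict is exact: value = 1 + BFS distance of its key
def DistOK (graph : List (Int × List Int)) (src : Int) (d : PySem.Dict Int Int) : Prop :=
  d.keys.Nodup ∧ ∀ v w, d.get? v = some w → ∃ k, MinK graph src v k ∧ w = (k : Int) + 1

lemma relax_spec (graph : List (Int × List Int)) (src : Int) (r ku : Nat) (u du : Int)
    (hu : MinK graph src u ku) (hkur : ku ≤ r) (hdu : du = (ku : Int) + 1) :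
    ∀ (adj : List Int), (∀ v ∈ adj, v ∈ pvAdj graph u) →
    ∀ d, DistOK graph src d → (∀ y, y ∈ RSet graph src r → d.contains y = true) →
      (∀ y, d.contains y = true → y ∈ RSet graph src (r + 1)) →
    DistOK graph src (bfsRelax du adj d) ∧
      (∀ y, y ∈ RSet graph src r → (bfsRelax du adj d).contains y = true) ∧
      (∀ y, (bfsRelax du adj d).contains y = true → y ∈ RSet graph src (r + 1)) ∧
      (∀ y, d.contains y = true → (bfsRelax du adj d).contains y = true) ∧
      (∀ v ∈ adj, (bfsRelax du adj d).contains v = true) := by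
  intro adj
  induction adj with
  | nil =>
    intro _ d hOK hlow hhigh
    exact ⟨hOK, hlow, hhigh, fun y hy => hy, by simp⟩
  | cons v t ih =>
    intro hadj d hOK hlow hhigh
    have hvadj : v ∈ pvAdj graph u := hadj v List.mem_cons_self
    have hrelax : bfsRelax du (v :: t) d
        = bfsRelax du t
            (if d.contains v = false ∨ du + 1 < d.getD v 0 then d.insert v (du + 1) else d) := by
      rw [bfsRelax, List.foldl_cons]; rfl
    set d1 := if d.contains v = false ∨ du + 1 < d.getD v 0 then d.insert v (du + 1) else d with hd1
    have hstep : DistOK graph src d1 ∧ (∀ y, y ∈ RSet graph src r → d1.contains y = true) ∧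
        (∀ y, d1.contains y = true → y ∈ RSet graph src (r + 1)) ∧
        (∀ y, d.contains y = true → d1.contains y = true) ∧ d1.contains v = true := by
      by_cases hc : d.contains v = true
      · -- v present, value exact, no update possible
        obtain ⟨w, hw⟩ : ∃ w, d.get? v = some w := by
          have := PySem.Dict.contains_eq_isSome_get? d v
          rw [hc] at this
          exact Option.isSome_iff_exists.mp this.symm
        obtain ⟨kv, hkv, hwv⟩ := hOK.2 v w hw
        have hkv_le : kv ≤ ku + 1 :=
          hkv.2 (ku + 1) (adj_mem_RSet graph src hu.1 hvadj)
        have hgetD : d.getD v 0 = w := PySem.Dict.getD_of_get?_eq_some d 0 hw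
        have hcond : ¬(d.contains v = false ∨ du + 1 < d.getD v 0) := by
          rintro (hf | hlt)
          · rw [hc] at hf; cases hf
          · rw [hgetD, hwv, hdu] at hlt
            have : (kv : Int) ≤ (ku : Int) + 1 := by exact_mod_cast hkv_le
            omega
        rw [hd1, if_neg hcond]
        exact ⟨hOK, hlow, hhigh, fun y hy => hy, hc⟩
      · -- v absent: fresh insert with the exact value
        have hcond : d.contains v = false ∨ du + 1 < d.getD v 0 :=
          Or.inl (by revert hc; cases d.contains v <;> simp)
        rw [hd1, if_pos hcond]
        have hvnotR : v ∉ RSet graph src r := fun hvR => hc (hlow v hvR)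
        have hminv : MinK graph src v (ku + 1) := by
          refine ⟨adj_mem_RSet graph src hu.1 hvadj, ?_⟩
          intro j hj
          by_contra hjlt
          exact hvnotR (RSet_mono graph src (by omega) hj)
        refine ⟨⟨PySem.Dict.nodup_keys_insert d v (du + 1) hOK.1, ?_⟩, ?_, ?_, ?_, ?_⟩
        · intro y w hyw
          rw [PySem.Dict.get?_insert] at hyw
          by_cases hyv : y = v
          · rw [if_pos hyv] at hyw
            refine ⟨ku + 1, hyv ▸ hminv, ?_⟩
            have : w = du + 1 := by injection hyw with h; exact h.symm
            rw [this, hdu]; push_cast; ring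
          · rw [if_neg hyv] at hyw
            exact hOK.2 y w hyw
        · intro y hy
          rw [PySem.Dict.contains_insert]
          rw [hlow y hy, Bool.or_true]
        · intro y hy
          rw [PySem.Dict.contains_insert] at hy
          rcases Bool.or_eq_true_iff.mp hy with hyv | hyd
          · have : y = v := by simpa using hyv
            subst this
            exact RSet_mono graph src (by omega : ku + 1 ≤ r + 1) hminv.1
          · exact hhigh y hyd
        · intro y hy
          rw [PySem.Dict.contains_insert, hy, Bool.or_true]
        · exact PySem.Dict.contains_insert_self d v (du + 1)
    rw [hrelax]
    obtain ⟨hOK1, hlow1, hhigh1, hmono1, hv1⟩ := hstep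
    obtain ⟨hOK2, hlow2, hhigh2, hmono2, ht2⟩ :=
      ih (fun x hx => hadj x (List.mem_cons_of_mem v hx)) d1 hOK1 hlow1 hhigh1
    refine ⟨hOK2, hlow2, hhigh2, fun y hy => hmono2 y (hmono1 y hy), ?_⟩
    intro x hx
    rcases List.mem_cons.mp hx with rfl | hx'
    · exact hmono2 x hv1
    · exact ht2 x hx'

lemma round_fold_spec (graph : List (Int × List Int)) (src : Int) (r : Nat) :
    ∀ (K : List Int), (∀ u ∈ K, u ∈ RSet graph src r) →
    ∀ d, DistOK graph src d → (∀ y, y ∈ RSet graph src r → d.contains y = true) →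
      (∀ y, d.contains y = true → y ∈ RSet graph src (r + 1)) →
    DistOK graph src (K.foldl (fun d u => bfsRelax (d.getD u 0) (pvAdj graph u) d) d) ∧
      (∀ y, y ∈ RSet graph src r →
        (K.foldl (fun d u => bfsRelax (d.getD u 0) (pvAdj graph u) d) d).contains y = true) ∧
      (∀ y, (K.foldl (fun d u => bfsRelax (d.getD u 0) (pvAdj graph u) d) d).contains y = true →
        y ∈ RSet graph src (r + 1)) ∧
      (∀ u ∈ K, ∀ v ∈ pvAdj graph u,
        (K.foldl (fun d u => bfsRelax (d.getD u 0) (pvAdj graph u) d) d).contains v = true) := by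
  intro K
  induction K with
  | nil =>
    intro _ d hOK hlow hhigh
    exact ⟨hOK, hlow, hhigh, by simp⟩
  | cons u K' ih =>
    intro hK d hOK hlow hhigh
    have huR : u ∈ RSet graph src r := hK u List.mem_cons_self
    obtain ⟨w, hw⟩ : ∃ w, d.get? u = some w := by
      have := PySem.Dict.contains_eq_isSome_get? d u
      rw [hlow u huR] at this
      exact Option.isSome_iff_exists.mp this.symm
    obtain ⟨ku, hku, hwu⟩ := hOK.2 u w hw
    have hgetD : d.getD u 0 = w := PySem.Dict.getD_of_get?_eq_some d 0 hw
    have hkur : ku ≤ r := hku.2 r huR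
    obtain ⟨hOK1, hlow1, hhigh1, hmono1, hadj1⟩ :=
      relax_spec graph src r ku u (d.getD u 0) hku hkur (by rw [hgetD, hwu])
        (pvAdj graph u) (fun v hv => hv) d hOK hlow hhigh
    rw [List.foldl_cons]
    obtain ⟨hOK2, hlow2, hhigh2, hK2⟩ :=
      ih (fun x hx => hK x (List.mem_cons_of_mem u hx)) _ hOK1 hlow1 hhigh1
    refine ⟨hOK2, hlow2, hhigh2, ?_⟩
    -- monotonicity of contains through the remaining fold
    have hmono_fold : ∀ (K'' : List Int) (d' : PySem.Dict Int Int) (y : Int),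
        d'.contains y = true →
        (K''.foldl (fun d u => bfsRelax (d.getD u 0) (pvAdj graph u) d) d').contains y = true := by
      intro K''
      induction K'' with
      | nil => intro d' y hy; simpa using hy
      | cons a tl ihm =>
        intro d' y hy
        rw [List.foldl_cons]
        apply ihm
        -- contains is monotone through one bfsRelax
        have : ∀ (adj : List Int) (dd : PySem.Dict Int Int) (du : Int) (y : Int),
            dd.contains y = true → (bfsRelax du adj dd).contains y = true := by
          intro adj
          induction adj with
          | nil => intro dd du y h; simpa [bfsRelax] using h
          | cons b tb ihb =>
            intro dd du y h
            rw [show bfsRelax du (b :: tb) dd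
                = bfsRelax du tb
                  (if dd.contains b = false ∨ du + 1 < dd.getD b 0 then dd.insert b (du + 1) else dd) by
              rw [bfsRelax, List.foldl_cons]; rfl]
            apply ihb
            by_cases hc : dd.contains b = false ∨ du + 1 < dd.getD b 0
            · rw [if_pos hc, PySem.Dict.contains_insert, h, Bool.or_true]
            · rw [if_neg hc]; exact h
        exact this _ _ _ _ hy
    intro x hx v hv
    rcases List.mem_cons.mp hx with rfl | hx'
    · exact hmono_fold K' _ v (hadj1 v hv)
    · exact hK2 x hx' v hv

lemma rounds_spec (graph : List (Int × List Int)) (src : Int) :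
    ∀ (m : Nat),
      DistOK graph src ((List.range m).foldl (fun d _ => bfsRound graph d)
        (PySem.Dict.insert PySem.Dict.empty src 1)) ∧
      (∀ y, ((List.range m).foldl (fun d _ => bfsRound graph d)
        (PySem.Dict.insert PySem.Dict.empty src 1)).contains y = true ↔ y ∈ RSet graph src m) := by
  intro m
  induction m with
  | zero =>
    simp only [List.range_zero, List.foldl_nil]
    constructor
    · refine ⟨PySem.Dict.nodup_keys_insert _ src 1 PySem.Dict.nodup_keys_empty, ?_⟩
      intro v w hvw
      rw [PySem.Dict.get?_insert] at hvw
      by_cases hv : v = src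
      · rw [if_pos hv] at hvw
        refine ⟨0, ⟨by simp [RSet, hv], fun j _ => Nat.zero_le j⟩, by injection hvw with h; omega⟩
      · rw [if_neg hv, PySem.Dict.get?_empty] at hvw; cases hvw
    · intro y
      rw [PySem.Dict.contains_insert]
      constructor
      · intro h
        have : y = src := by simpa [PySem.Dict.contains_empty] using h
        simp [RSet, this]
      · intro h
        have : y = src := by simpa [RSet] using h
        simp [this, PySem.Dict.contains_empty]
  | succ m ih =>
    rw [List.range_succ, List.foldl_append, List.foldl_cons, List.foldl_nil]
    set dm := (List.range m).foldl (fun d _ => bfsRound graph d)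
      (PySem.Dict.insert PySem.Dict.empty src 1) with hdm
    obtain ⟨hOK, hiff⟩ := ih
    have hK : ∀ u ∈ PySem.Dict.keys dm, u ∈ RSet graph src m := by
      intro u hu
      exact (hiff u).mp ((PySem.Dict.contains_iff_mem_keys dm u).mpr hu)
    obtain ⟨hOK', hlow', hhigh', hKadj⟩ :=
      round_fold_spec graph src m (PySem.Dict.keys dm) hK dm hOK
        (fun y hy => (hiff y).mpr hy)
        (fun y hy => RSet_subset_succ graph src m ((hiff y).mp hy))
    refine ⟨hOK', ?_⟩
    intro y
    constructor
    · intro hy; exact hhigh' y hy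
    · intro hy
      rcases (mem_RSet_succ graph src y m).mp hy with hR | ⟨u, hu, hadj⟩
      · exact hlow' y hR
      · exact hKadj u ((PySem.Dict.contains_iff_mem_keys dm u).mp ((hiff u).mpr hu)) y hadj

-- the final scan: a foldl computing the minimum value among sink entries
lemma scan_spec (graph : List (Int × List Int)) :
    ∀ (items : List (Int × Int)) (acc : Option Int),
      (∀ b, acc = some b → ∃ m, (items.foldl
          (fun (best : Option Int) p =>
            if (pvAdj graph p.1).length = 0 then
              match best with
              | none => some p.2
              | some b => if p.2 < b then some p.2 else some b
            else best) acc) = some m ∧ m ≤ b) ∧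
      (∀ p ∈ items, (pvAdj graph p.1).length = 0 → ∃ m, (items.foldl
          (fun (best : Option Int) p =>
            if (pvAdj graph p.1).length = 0 then
              match best with
              | none => some p.2
              | some b => if p.2 < b then some p.2 else some b
            else best) acc) = some m ∧ m ≤ p.2) ∧
      (∀ m, (items.foldl
          (fun (best : Option Int) p =>
            if (pvAdj graph p.1).length = 0 then
              match best with
              | none => some p.2
              | some b => if p.2 < b then some p.2 else some b
            else best) acc) = some m →
        acc = some m ∨ ∃ p ∈ items, (pvAdj graph p.1).length = 0 ∧ m = p.2) ∧
      ((items.foldl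
          (fun (best : Option Int) p =>
            if (pvAdj graph p.1).length = 0 then
              match best with
              | none => some p.2
              | some b => if p.2 < b then some p.2 else some b
            else best) acc) = none →
        acc = none ∧ ∀ p ∈ items, (pvAdj graph p.1).length ≠ 0) := by
  intro items
  induction items with
  | nil =>
    intro acc
    refine ⟨?_, by simp, ?_, ?_⟩
    · intro b hb; exact ⟨b, hb, le_refl b⟩
    · intro m hm; exact Or.inl hm
    · intro hm; exact ⟨hm, by simp⟩
  | cons p t ih =>
    intro acc
    rw [List.foldl_cons]
    set acc1 := (if (pvAdj graph p.1).length = 0 then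
      match acc with
      | none => some p.2
      | some b => if p.2 < b then some p.2 else some b
      else acc) with hacc1
    obtain ⟨ih1, ih2, ih3, ih4⟩ := ih acc1
    refine ⟨?_, ?_, ?_, ?_⟩
    · -- lower bound w.r.t. acc
      intro b hb
      by_cases hs : (pvAdj graph p.1).length = 0
      · rw [hb] at hacc1
        by_cases hlt : p.2 < b
        · obtain ⟨m, hm, hmle⟩ := ih1 p.2 (by rw [hacc1]; simp [hs, hlt])
          exact ⟨m, hm, le_trans hmle (le_of_lt hlt)⟩
        · exact ih1 b (by rw [hacc1]; simp [hs, hlt])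
      · exact ih1 b (by rw [hacc1, if_neg hs, hb])
    · -- lower bound w.r.t. every sink entry
      intro q hq hqs
      rcases List.mem_cons.mp hq with rfl | hq'
      · cases hacc' : acc with
        | none =>
          obtain ⟨m, hm, hmle⟩ := ih1 q.2 (by rw [hacc1, if_pos hqs, hacc'])
          exact ⟨m, hm, hmle⟩
        | some b =>
          by_cases hlt : q.2 < b
          · exact ih1 q.2 (by rw [hacc1, if_pos hqs, hacc']; simp [hlt])
          · obtain ⟨m, hm, hmle⟩ := ih1 b (by rw [hacc1, if_pos hqs, hacc']; simp [hlt])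
            exact ⟨m, hm, le_trans hmle (by omega)⟩
      · exact ih2 q hq' hqs
    · -- provenance
      intro m hm
      rcases ih3 m hm with hacc' | ⟨q, hq, hqs, hqm⟩
      · by_cases hs : (pvAdj graph p.1).length = 0
        · cases hacc'' : acc with
          | none =>
            have hval : acc1 = some p.2 := by rw [hacc1, if_pos hs, hacc'']
            rw [hval] at hacc'
            right
            exact ⟨p, List.mem_cons_self, hs, by injection hacc' with h; omega⟩
          | some b =>
            have hval : acc1 = if p.2 < b then some p.2 else some b := by
              rw [hacc1, if_pos hs, hacc'']
            rw [hval] at hacc'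
            by_cases hlt : p.2 < b
            · rw [if_pos hlt] at hacc'
              right
              refine ⟨p, List.mem_cons_self, hs, ?_⟩
              injection hacc' with h; omega
            · rw [if_neg hlt] at hacc'
              left; exact hacc'
        · rw [hacc1, if_neg hs] at hacc'
          exact Or.inl hacc'
      · exact Or.inr ⟨q, List.mem_cons_of_mem p hq, hqs, hqm⟩
    · -- none case
      intro hm
      obtain ⟨hacc', ht⟩ := ih4 hm
      by_cases hs : (pvAdj graph p.1).length = 0
      · exfalso
        cases hacc'' : acc with
        | none =>
          have hval : acc1 = some p.2 := by rw [hacc1, if_pos hs, hacc'']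
          rw [hval] at hacc'; cases hacc'
        | some b =>
          have hval : acc1 = if p.2 < b then some p.2 else some b := by
            rw [hacc1, if_pos hs, hacc'']
          rw [hval] at hacc'
          by_cases hlt : p.2 < b <;> simp [hlt] at hacc'
      · rw [hacc1, if_neg hs] at hacc'
        refine ⟨hacc', ?_⟩
        intro q hq
        rcases List.mem_cons.mp hq with rfl | hq'
        · exact hs
        · exact ht q hq'

lemma alt_isAns (graph : List (Int × List Int)) (src : Int) :
    IsAns graph src (bfs_alt graph src) := by
  rw [bfs_alt]
  set dist := (List.range (graph.length + 1)).foldl (fun d _ => bfsRound graph d)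
    (PySem.Dict.insert PySem.Dict.empty src 1) with hdist
  obtain ⟨hOK, hiff⟩ := rounds_spec graph src (graph.length + 1)
  obtain ⟨hs1, hs2, hs3, hs4⟩ := scan_spec graph (PySem.Dict.items dist) none
  -- membership of reachable nodes among the items
  have hitem : ∀ v (k : Nat), v ∈ RSet graph src k →
      ∃ w kv, (v, w) ∈ PySem.Dict.items dist ∧ MinK graph src v kv ∧ w = (kv : Int) + 1 := by
    intro v k hv
    have hvfin : v ∈ RSet graph src (graph.length + 1) := RSet_stable graph src k hv
    have hc : dist.contains v = true := (hiff v).mpr hvfin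
    obtain ⟨w, hw⟩ : ∃ w, dist.get? v = some w := by
      have := PySem.Dict.contains_eq_isSome_get? dist v
      rw [hc] at this
      exact Option.isSome_iff_exists.mp this.symm
    obtain ⟨kv, hkv, hwv⟩ := hOK.2 v w hw
    exact ⟨w, kv, (PySem.Dict.get?_eq_some_iff_mem_items dist v w hOK.1).mp hw, hkv, hwv⟩
  cases hres : (PySem.Dict.items dist).foldl
      (fun (best : Option Int) p =>
        if (pvAdj graph p.1).length = 0 then
          match best with
          | none => some p.2
          | some b => if p.2 < b then some p.2 else some b
        else best) none with
  | none =>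
    left
    refine ⟨rfl, ?_⟩
    intro v k hv
    obtain ⟨w, kv, hmem, _, _⟩ := hitem v k hv
    intro hsink
    exact ((hs4 hres).2 (v, w) hmem) (by rw [hsink]; rfl)
  | some m =>
    right
    rcases hs3 m hres with hacc | ⟨p, hp, hps, hpm⟩
    · cases hacc
    · have hget : dist.get? p.1 = some p.2 :=
        (PySem.Dict.get?_eq_some_iff_mem_items dist p.1 p.2 hOK.1).mpr (by
          obtain ⟨a, b⟩ := p; exact hp)
      obtain ⟨kp, hkp, hwp⟩ := hOK.2 p.1 p.2 hget
      refine ⟨kp, p.1, hkp, List.length_eq_zero_iff.mp hps, by rw [hpm, hwp], ?_⟩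
      intro v' k' hmin' hsink'
      obtain ⟨w', kv', hmem', hkv', hwv'⟩ := hitem v' k' hmin'.1
      have hkeq : kv' = k' := by
        have h1 := hkv'.2 k' hmin'.1
        have h2 := hmin'.2 kv' hkv'.1
        omega
      obtain ⟨m2, hm2, hm2le⟩ := hs2 (v', w') hmem' (by
        rw [List.length_eq_zero_iff]; exact hsink')
      rw [hres] at hm2
      have : m = m2 := by injection hm2
      subst this
      have hle : m ≤ (k' : Int) + 1 := by rw [← hkeq]; rw [hwv'] at hm2le; exact hm2le
      rw [hpm, hwp] at hle
      have : (kp : Int) ≤ (k' : Int) := by omega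
      exact_mod_cast this

-- ===== VERDICT (by name: the statement is the Claim_ definition above) =====
theorem bfs_spec : Claim_equal_bfs := by
  intro graph src _ _
  show bfs graph src = bfs_alt graph src
  exact isAns_unique graph src _ _ (bfs_isAns graph src) (alt_isAns graph src)
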